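-- pv_equiv track=rewrite | github.com/TelevisionNinja/Denoising-Diffusion-Probabilistic-Model | src/main.py | filter_file_paths_not_includes
-- ===== SOURCE A (Python) =====
-- def filter_file_paths_not_includes(file_list, string_list):
--     filtered = []
--
--     for file_name in file_list:
--         contains_none = True
--
--         for string in string_list:
--             if string in str(file_name):
--                 contains_none = False
--                 break
--
--         if contains_none:
--             filtered.append(file_name)
--
--     return filtered
-- ===== SOURCE B (Python) =====
-- def filter_file_paths_not_includes(file_list, string_list):
--     # pattern-major strategy: start from the full list and, for each pattern,
--     # drop the files that contain it; survivors contain none of the patterns.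
--     remaining = list(file_list)
--     for string in string_list:
--         remaining = [f for f in remaining if string not in str(f)]
--     return remaining
-- ===== Notes on version B (the rewrite author's own statement) =====
-- stated objective: alternative
-- what changed: Swapped the loop nesting: instead of testing every pattern against each file with an inner break, B folds over the patterns, filtering the surviving file list once per pattern.
import Mathlib
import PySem

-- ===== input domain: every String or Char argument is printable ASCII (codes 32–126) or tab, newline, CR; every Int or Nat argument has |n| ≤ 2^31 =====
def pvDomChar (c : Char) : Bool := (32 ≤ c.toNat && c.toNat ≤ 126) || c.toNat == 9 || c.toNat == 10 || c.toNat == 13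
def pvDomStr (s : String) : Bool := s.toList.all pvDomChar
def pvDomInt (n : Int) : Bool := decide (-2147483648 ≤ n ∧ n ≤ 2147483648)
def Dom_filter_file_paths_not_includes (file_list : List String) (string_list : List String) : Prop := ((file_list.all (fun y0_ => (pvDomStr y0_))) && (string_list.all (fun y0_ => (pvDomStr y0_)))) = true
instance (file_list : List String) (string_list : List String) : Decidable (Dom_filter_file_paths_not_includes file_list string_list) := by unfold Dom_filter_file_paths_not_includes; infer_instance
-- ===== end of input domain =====

-- B swaps the loop nesting: one filtering pass over the surviving files per pattern,
-- instead of A's inner pattern loop with a break per file (objective: alternative).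

-- ===== PORT A =====
-- inner 'for string in string_list: if string in file_name: contains_none = False; break'
def pvA_containsNone (file_name : String) : List String → Bool
  | [] => true
  | s :: rest => if PySem.Str.isIn s file_name then false else pvA_containsNone file_name rest

def filter_file_paths_not_includes (file_list : List String) (string_list : List String) : List String :=
  file_list.foldl (fun filtered f => if pvA_containsNone f string_list then filtered ++ [f] else filtered) []

-- ===== PORT B =====
def filter_file_paths_not_includes_alt (file_list : List String) (string_list : List String) : List String :=
  string_list.foldl (fun remaining s => remaining.filter (fun f => !(PySem.Str.isIn s f))) file_list

-- ===== PRECONDITION & SPEC =====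
def Spec_filter_file_paths_not_includes (file_list : List String) (string_list : List String) (out : List String) : Prop := out = filter_file_paths_not_includes_alt file_list string_list
instance (file_list : List String) (string_list : List String) (out : List String) : Decidable (Spec_filter_file_paths_not_includes file_list string_list out) := by unfold Spec_filter_file_paths_not_includes; infer_instance

-- ===== CLAIM (what is proved, stated in full; the proofs are below) =====
def Claim_equal_filter_file_paths_not_includes : Prop := ∀ (file_list : List String) (string_list : List String), Dom_filter_file_paths_not_includes file_list string_list → Spec_filter_file_paths_not_includes file_list string_list (filter_file_paths_not_includes file_list string_list)

-- ===== LEMMAS AND PROOFS =====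
-- A's inner loop decides "f contains none of the patterns"
theorem pvA_containsNone_eq_all (f : String) (ss : List String) :
    pvA_containsNone f ss = ss.all (fun s => !(PySem.Str.isIn s f)) := by
  induction ss with
  | nil => rfl
  | cons s rest ih =>
    simp only [pvA_containsNone, List.all_cons, ih]
    cases PySem.Str.isIn s f <;> simp

-- B's pattern-major fold is a single filter by the conjunction of all pattern tests
theorem pvB_foldl_eq_filter (ss : List String) (l : List String) :
    ss.foldl (fun remaining s => remaining.filter (fun f => !(PySem.Str.isIn s f))) l
      = l.filter (fun f => ss.all (fun s => !(PySem.Str.isIn s f))) := by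
  induction ss generalizing l with
  | nil => simp
  | cons s rest ih =>
    simp only [List.foldl_cons, ih, List.filter_filter, List.all_cons]
    congr 1
    funext f
    exact Bool.and_comm _ _

-- ===== VERDICT (by name: the statement is the Claim_ definition above) =====
theorem filter_file_paths_not_includes_spec : Claim_equal_filter_file_paths_not_includes := by
  intro file_list string_list _
  unfold Spec_filter_file_paths_not_includes filter_file_paths_not_includes filter_file_paths_not_includes_alt
  rw [PySem.List.foldl_append_if_eq_filter, pvB_foldl_eq_filter]
  simp [pvA_containsNone_eq_all]
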